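-- pv_equiv track=rewrite | github.com/reginaabu/ljmu_final_thesis_project | app.py | _infer_medquad_q_type
-- ===== SOURCE A (Python) =====
-- def _infer_medquad_q_type(query: str) -> str | None:
--     """
--     Map a free-text query to one of MedQuAD's question_type values so the
--     hybrid/semantic index can restrict candidates to the matching question facet.
--     Rules are ordered from most specific to most general.
--     Returns None when no rule fires (falls back to unfiltered retrieval).
--     """
--     q = query.lower()
--     if any(w in q for w in ["brand name", "brand names"]):
--         return "brand names"
--     if any(w in q for w in ["storage", "disposal", "store and dispos"]):
--         return "storage and disposal"
--     if any(w in q for w in ["forgot a dose", "forget a dose", "missed dose", "miss a dose"]):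
--         return "forget a dose"
--     if any(w in q for w in ["side effect", "adverse effect", "adverse reaction"]):
--         return "side effects"
--     if any(w in q for w in ["overdose", "emergency overdose"]):
--         return "emergency or overdose"
--     if any(w in q for w in ["important warning", "warnings"]):
--         return "important warning"
--     if any(w in q for w in ["genetic change", "gene mutation", "genetic mutation"]):
--         return "genetic changes"
--     if any(w in q for w in ["inherit", "hereditary", "is it inherited"]):
--         return "inheritance"
--     if any(w in q for w in ["symptom", "sign of", "signs of"]):
--         return "symptoms"
--     if any(w in q for w in ["cause", "causes", "what causes"]):
--         return "causes"
--     if any(w in q for w in ["treatment", "treat ", "therapy", "therapies", "manage ", "cure"]):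
--         return "treatment"
--     if any(w in q for w in ["diagnos", "test for", "how is it detected", "exams"]):
--         return "exams and tests"
--     if any(w in q for w in ["prevent", "prevention"]):
--         return "prevention"
--     if any(w in q for w in ["outlook", "prognos"]):
--         return "outlook"
--     if any(w in q for w in ["see a doctor", "need a doctor", "contact a medical", "when to call"]):
--         return "when to contact a medical professional"
--     if any(w in q for w in ["complication"]):
--         return "complications"
--     if any(w in q for w in ["how many", "how common", "how frequent", "prevalence", "frequency"]):
--         return "frequency"
--     if any(w in q for w in ["how should", "how to use", "dosage", "how much to take"]):
--         return "usage"
--     if any(w in q for w in ["who should get", "prescribed for", "why is it prescribed", "indication"]):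
--         return "indication"
--     if any(w in q for w in ["other information", "what else should", "what other information"]):
--         return "other information"
--     if any(w in q for w in ["precaution"]):
--         return "precautions"
--     if any(w in q for w in ["suscept", "who is at risk", "risk factor"]):
--         return "susceptibility"
--     if any(w in q for w in ["dietary", "food", "eat "]):
--         return "dietary"
--     if any(w in q for w in ["research", "latest research"]):
--         return "research"
--     if any(w in q for w in ["what is", "what are", "describe", "information about"]):
--         return "information"
--     return None
-- ===== SOURCE B (Python) =====
-- # Flat pattern table with numeric priorities; collects ALL matches in one pass
-- # and returns the label of minimal priority (no early return, no per-rule any).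
-- _LABELS = ['brand names', 'storage and disposal', 'forget a dose', 'side effects', 'emergency or overdose', 'important warning', 'genetic changes', 'inheritance', 'symptoms', 'causes', 'treatment', 'exams and tests', 'prevention', 'outlook', 'when to contact a medical professional', 'complications', 'frequency', 'usage', 'indication', 'other information', 'precautions', 'susceptibility', 'dietary', 'research', 'information']
--
-- _PATTERNS = [('brand name', 0), ('brand names', 0), ('storage', 1), ('disposal', 1), ('store and dispos', 1), ('forgot a dose', 2), ('forget a dose', 2), ('missed dose', 2), ('miss a dose', 2), ('side effect', 3), ('adverse effect', 3), ('adverse reaction', 3), ('overdose', 4), ('emergency overdose', 4), ('important warning', 5), ('warnings', 5), ('genetic change', 6), ('gene mutation', 6), ('genetic mutation', 6), ('inherit', 7), ('hereditary', 7), ('is it inherited', 7), ('symptom', 8), ('sign of', 8), ('signs of', 8), ('cause', 9), ('causes', 9), ('what causes', 9), ('treatment', 10), ('treat ', 10), ('therapy', 10), ('therapies', 10), ('manage ', 10), ('cure', 10), ('diagnos', 11), ('test for', 11), ('how is it detected', 11), ('exams', 11), ('prevent', 12), ('prevention', 12), ('outlook', 13), ('prognos', 13), ('see a doctor', 14), ('need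 a doctor', 14), ('contact a medical', 14), ('when to call', 14), ('complication', 15), ('how many', 16), ('how common', 16), ('how frequent', 16), ('prevalence', 16), ('frequency', 16), ('how should', 17), ('how to use', 17), ('dosage', 17), ('how much to take', 17), ('who should get', 18), ('prescribed for', 18), ('why is it prescribed', 18), ('indication', 18), ('other information', 19), ('what else should', 19), ('what other information', 19), ('precaution', 20), ('suscept', 21), ('who is at risk', 21), ('risk factor', 21), ('dietary', 22), ('food', 22), ('eat ', 22), ('research', 23), ('latest research', 23), ('what is', 24), ('what are', 24), ('describe', 24), ('information about', 24)]
--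
-- def _infer_medquad_q_type(query: str) -> str | None:
--     q = query.lower()
--     best = None
--     for pat, pri in _PATTERNS:
--         if pat in q:
--             best = pri if best is None else min(best, pri)
--     return None if best is None else _LABELS[best]
-- ===== Notes on version B (the rewrite author's own statement) =====
-- stated objective: alternative
-- what changed: Instead of A's 25-branch first-match if-chain, B makes one flat pass over a (substring, priority) table, collecting every matching pattern and returning the label of minimal priority from a label array; correctness rests on the proved fact that the minimum matched priority equals the first firing rule.
import Mathlib
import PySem

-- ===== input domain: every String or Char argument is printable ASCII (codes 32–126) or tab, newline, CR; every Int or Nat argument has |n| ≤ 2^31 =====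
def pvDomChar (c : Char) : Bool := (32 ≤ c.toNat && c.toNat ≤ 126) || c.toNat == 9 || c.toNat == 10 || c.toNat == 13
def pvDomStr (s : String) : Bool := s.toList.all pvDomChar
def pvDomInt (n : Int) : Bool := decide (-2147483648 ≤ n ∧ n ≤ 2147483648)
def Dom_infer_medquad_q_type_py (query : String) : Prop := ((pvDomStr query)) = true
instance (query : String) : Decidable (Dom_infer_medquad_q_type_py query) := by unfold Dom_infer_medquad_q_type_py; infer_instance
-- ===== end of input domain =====

-- B replaces A's 25-branch first-match if-chain by one flat pass over a (pattern, priority)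
-- table that records every match and returns the label of MINIMAL priority (objective: alternative).
-- ===== PORT A =====
def infer_medquad_q_type_py (query : String) : Option String :=
  let q := PySem.Str.lower query
  if ["brand name", "brand names"].any (fun w => PySem.Str.isIn w q) then some "brand names" else
  if ["storage", "disposal", "store and dispos"].any (fun w => PySem.Str.isIn w q) then some "storage and disposal" else
  if ["forgot a dose", "forget a dose", "missed dose", "miss a dose"].any (fun w => PySem.Str.isIn w q) then some "forget a dose" else
  if ["side effect", "adverse effect", "adverse reaction"].any (fun w => PySem.Str.isIn w q) then some "side effects" else
  if ["overdose", "emergency overdose"].any (fun w => PySem.Str.isIn w q) then some "emergency or overdose" else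
  if ["important warning", "warnings"].any (fun w => PySem.Str.isIn w q) then some "important warning" else
  if ["genetic change", "gene mutation", "genetic mutation"].any (fun w => PySem.Str.isIn w q) then some "genetic changes" else
  if ["inherit", "hereditary", "is it inherited"].any (fun w => PySem.Str.isIn w q) then some "inheritance" else
  if ["symptom", "sign of", "signs of"].any (fun w => PySem.Str.isIn w q) then some "symptoms" else
  if ["cause", "causes", "what causes"].any (fun w => PySem.Str.isIn w q) then some "causes" else
  if ["treatment", "treat ", "therapy", "therapies", "manage ", "cure"].any (fun w => PySem.Str.isIn w q) then some "treatment" else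
  if ["diagnos", "test for", "how is it detected", "exams"].any (fun w => PySem.Str.isIn w q) then some "exams and tests" else
  if ["prevent", "prevention"].any (fun w => PySem.Str.isIn w q) then some "prevention" else
  if ["outlook", "prognos"].any (fun w => PySem.Str.isIn w q) then some "outlook" else
  if ["see a doctor", "need a doctor", "contact a medical", "when to call"].any (fun w => PySem.Str.isIn w q) then some "when to contact a medical professional" else
  if ["complication"].any (fun w => PySem.Str.isIn w q) then some "complications" else
  if ["how many", "how common", "how frequent", "prevalence", "frequency"].any (fun w => PySem.Str.isIn w q) then some "frequency" else
  if ["how should", "how to use", "dosage", "how much to take"].any (fun w => PySem.Str.isIn w q) then some "usage" else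
  if ["who should get", "prescribed for", "why is it prescribed", "indication"].any (fun w => PySem.Str.isIn w q) then some "indication" else
  if ["other information", "what else should", "what other information"].any (fun w => PySem.Str.isIn w q) then some "other information" else
  if ["precaution"].any (fun w => PySem.Str.isIn w q) then some "precautions" else
  if ["suscept", "who is at risk", "risk factor"].any (fun w => PySem.Str.isIn w q) then some "susceptibility" else
  if ["dietary", "food", "eat "].any (fun w => PySem.Str.isIn w q) then some "dietary" else
  if ["research", "latest research"].any (fun w => PySem.Str.isIn w q) then some "research" else
  if ["what is", "what are", "describe", "information about"].any (fun w => PySem.Str.isIn w q) then some "information" else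
  none

-- ===== PORT B =====
def medquadLabels : List String := ["brand names", "storage and disposal", "forget a dose", "side effects", "emergency or overdose", "important warning", "genetic changes", "inheritance", "symptoms", "causes", "treatment", "exams and tests", "prevention", "outlook", "when to contact a medical professional", "complications", "frequency", "usage", "indication", "other information", "precautions", "susceptibility", "dietary", "research", "information"]

def medquadPatterns : List (String × Nat) := [
  ("brand name", 0), ("brand names", 0),
  ("storage", 1), ("disposal", 1), ("store and dispos", 1),
  ("forgot a dose", 2), ("forget a dose", 2), ("missed dose", 2), ("miss a dose", 2),
  ("side effect", 3), ("adverse effect", 3), ("adverse reaction", 3),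
  ("overdose", 4), ("emergency overdose", 4),
  ("important warning", 5), ("warnings", 5),
  ("genetic change", 6), ("gene mutation", 6), ("genetic mutation", 6),
  ("inherit", 7), ("hereditary", 7), ("is it inherited", 7),
  ("symptom", 8), ("sign of", 8), ("signs of", 8),
  ("cause", 9), ("causes", 9), ("what causes", 9),
  ("treatment", 10), ("treat ", 10), ("therapy", 10), ("therapies", 10), ("manage ", 10), ("cure", 10),
  ("diagnos", 11), ("test for", 11), ("how is it detected", 11), ("exams", 11),
  ("prevent", 12), ("prevention", 12),
  ("outlook", 13), ("prognos", 13),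
  ("see a doctor", 14), ("need a doctor", 14), ("contact a medical", 14), ("when to call", 14),
  ("complication", 15),
  ("how many", 16), ("how common", 16), ("how frequent", 16), ("prevalence", 16), ("frequency", 16),
  ("how should", 17), ("how to use", 17), ("dosage", 17), ("how much to take", 17),
  ("who should get", 18), ("prescribed for", 18), ("why is it prescribed", 18), ("indication", 18),
  ("other information", 19), ("what else should", 19), ("what other information", 19),
  ("precaution", 20),
  ("suscept", 21), ("who is at risk", 21), ("risk factor", 21),
  ("dietary", 22), ("food", 22), ("eat ", 22),
  ("research", 23), ("latest research", 23),
  ("what is", 24), ("what are", 24), ("describe", 24), ("information about", 24)]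

-- the single pass of Source B: fold over the flat table keeping the minimal matched priority
def minMatchedPri (q : List Char) (pats : List (String × Nat)) : Option Nat :=
  pats.foldl (fun best wp =>
    if PySem.Chars.isIn wp.1.toList q then
      some (match best with | none => wp.2 | some b => min b wp.2)
    else best) none

def infer_medquad_q_type_py_alt (query : String) : Option String :=
  match minMatchedPri (PySem.Chars.lower query.toList) medquadPatterns with
  | none => none
  | some i => PySem.List.pyGet? medquadLabels (i : Int)

-- ===== PRECONDITION & SPEC =====
def Spec_infer_medquad_q_type_py (query : String) (out : Option String) : Prop := out = infer_medquad_q_type_py_alt query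
instance (query : String) (out : Option String) : Decidable (Spec_infer_medquad_q_type_py query out) := by unfold Spec_infer_medquad_q_type_py; infer_instance

-- ===== CLAIM =====
def Claim_equal_infer_medquad_q_type_py : Prop := ∀ (query : String), Dom_infer_medquad_q_type_py query → Spec_infer_medquad_q_type_py query (infer_medquad_q_type_py query)

-- ===== LEMMAS AND PROOFS =====
-- the 25 pattern groups, in priority order (proof-side view of the two tables)
def mqRules : List (List String) := [
  ["brand name", "brand names"],
  ["storage", "disposal", "store and dispos"],
  ["forgot a dose", "forget a dose", "missed dose", "miss a dose"],
  ["side effect", "adverse effect", "adverse reaction"],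
  ["overdose", "emergency overdose"],
  ["important warning", "warnings"],
  ["genetic change", "gene mutation", "genetic mutation"],
  ["inherit", "hereditary", "is it inherited"],
  ["symptom", "sign of", "signs of"],
  ["cause", "causes", "what causes"],
  ["treatment", "treat ", "therapy", "therapies", "manage ", "cure"],
  ["diagnos", "test for", "how is it detected", "exams"],
  ["prevent", "prevention"],
  ["outlook", "prognos"],
  ["see a doctor", "need a doctor", "contact a medical", "when to call"],
  ["complication"],
  ["how many", "how common", "how frequent", "prevalence", "frequency"],
  ["how should", "how to use", "dosage", "how much to take"],
  ["who should get", "prescribed for", "why is it prescribed", "indication"],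
  ["other information", "what else should", "what other information"],
  ["precaution"],
  ["suscept", "who is at risk", "risk factor"],
  ["dietary", "food", "eat "],
  ["research", "latest research"],
  ["what is", "what are", "describe", "information about"]]

def mqFlat : List (List String) → Nat → List (String × Nat)
  | [], _ => []
  | ps :: rest, k => ps.map (fun w => (w, k)) ++ mqFlat rest (k + 1)

def mqStep (q : List Char) : Option Nat → String × Nat → Option Nat :=
  fun best wp =>
    if PySem.Chars.isIn wp.1.toList q then
      some (match best with | none => wp.2 | some b => min b wp.2)
    else best

def mqFirst (q : List Char) : List (List String) → Nat → Option Nat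
  | [], _ => none
  | ps :: rest, k =>
      if ps.any (fun w => PySem.Chars.isIn w.toList q) then some k
      else mqFirst q rest (k + 1)

theorem mqFlat_ge : ∀ (rules : List (List String)) (k : Nat),
    ∀ wp ∈ mqFlat rules k, k ≤ wp.2 := by
  intro rules
  induction rules with
  | nil => intro k wp h; simp [mqFlat] at h
  | cons ps rest ih =>
      intro k wp h
      simp only [mqFlat, List.mem_append, List.mem_map] at h
      rcases h with ⟨w, _, rfl⟩ | h
      · exact le_refl k
      · exact Nat.le_of_succ_le (ih (k + 1) wp h)

theorem foldl_mqStep_some (q : List Char) (b : Nat) :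
    ∀ (pats : List (String × Nat)), (∀ wp ∈ pats, b ≤ wp.2) →
      pats.foldl (mqStep q) (some b) = some b := by
  intro pats
  induction pats with
  | nil => intro _; rfl
  | cons wp rest ih =>
      intro h
      have hb : b ≤ wp.2 := h wp (by simp)
      have hrest : ∀ x ∈ rest, b ≤ x.2 := fun x hx => h x (by simp [hx])
      simp only [List.foldl_cons, mqStep]
      split
      · rw [Nat.min_eq_left hb]; exact ih hrest
      · exact ih hrest

theorem foldl_mqStep_group (q : List Char) (k : Nat) :
    ∀ (ps : List String),
      (ps.map (fun w => (w, k))).foldl (mqStep q) none =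
        if ps.any (fun w => PySem.Chars.isIn w.toList q) then some k else none := by
  intro ps
  induction ps with
  | nil => rfl
  | cons w rest ih =>
      simp only [List.map_cons, List.foldl_cons, List.any_cons, mqStep]
      by_cases hw : PySem.Chars.isIn w.toList q = true
      · simp only [hw, if_true, Bool.true_or]
        have : ∀ wp ∈ rest.map (fun w => (w, k)), k ≤ wp.2 := by
          intro wp h; simp only [List.mem_map] at h; rcases h with ⟨_, _, rfl⟩; exact le_refl k
        exact foldl_mqStep_some q k _ this
      · simp only [hw, Bool.false_or]; exact ih

theorem minMatched_eq_first (q : List Char) :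
    ∀ (rules : List (List String)) (k : Nat),
      (mqFlat rules k).foldl (mqStep q) none = mqFirst q rules k := by
  intro rules
  induction rules with
  | nil => intro k; rfl
  | cons ps rest ih =>
      intro k
      simp only [mqFlat, mqFirst, List.foldl_append, foldl_mqStep_group]
      by_cases hp : ps.any (fun w => PySem.Chars.isIn w.toList q) = true
      · simp only [hp, if_true]
        exact foldl_mqStep_some q k _ (fun wp h => Nat.le_of_succ_le (mqFlat_ge rest (k + 1) wp h))
      · simp only [hp]; exact ih (k + 1)

def mqChain (q : List Char) (L : List String) : List (List String) → Nat → Option String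
  | [], _ => none
  | ps :: rest, k =>
      if ps.any (fun w => PySem.Chars.isIn w.toList q) then PySem.List.pyGet? L (k : Int)
      else mqChain q L rest (k + 1)

theorem first_eq_chain (q : List Char) (L : List String) :
    ∀ (rules : List (List String)) (k : Nat),
      (match mqFirst q rules k with
        | none => none
        | some i => PySem.List.pyGet? L (i : Int)) = mqChain q L rules k := by
  intro rules
  induction rules with
  | nil => intro k; rfl
  | cons ps rest ih =>
      intro k
      simp only [mqFirst, mqChain]
      by_cases hp : ps.any (fun w => PySem.Chars.isIn w.toList q) = true
      · simp only [hp, if_true]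
      · simp only [hp]; exact ih (k + 1)

set_option maxHeartbeats 1000000 in
theorem patterns_eq_flat : medquadPatterns = mqFlat mqRules 0 := rfl

set_option maxHeartbeats 2000000 in
theorem infer_medquad_q_type_py_spec : Claim_equal_infer_medquad_q_type_py := by
  intro query _
  unfold Spec_infer_medquad_q_type_py infer_medquad_q_type_py infer_medquad_q_type_py_alt minMatchedPri
  rw [show (fun (best : Option Nat) (wp : String × Nat) =>
      if PySem.Chars.isIn wp.1.toList (PySem.Chars.lower query.toList) then
        some (match best with | none => wp.2 | some b => min b wp.2)
      else best) = mqStep (PySem.Chars.lower query.toList) from rfl,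
    patterns_eq_flat, minMatched_eq_first, first_eq_chain]
  simp only [mqRules, mqChain]
  simp only [Nat.reduceAdd]
  simp only [List.any_cons, List.any_nil, Bool.or_false]
  simp only [PySem.Str.isIn_eq, PySem.Str.toList_lower]
  simp only [show PySem.List.pyGet? medquadLabels ((0 : Nat) : Int) = some "brand names" from rfl,
    show PySem.List.pyGet? medquadLabels ((1 : Nat) : Int) = some "storage and disposal" from rfl,
    show PySem.List.pyGet? medquadLabels ((2 : Nat) : Int) = some "forget a dose" from rfl,
    show PySem.List.pyGet? medquadLabels ((3 : Nat) : Int) = some "side effects" from rfl,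
    show PySem.List.pyGet? medquadLabels ((4 : Nat) : Int) = some "emergency or overdose" from rfl,
    show PySem.List.pyGet? medquadLabels ((5 : Nat) : Int) = some "important warning" from rfl,
    show PySem.List.pyGet? medquadLabels ((6 : Nat) : Int) = some "genetic changes" from rfl,
    show PySem.List.pyGet? medquadLabels ((7 : Nat) : Int) = some "inheritance" from rfl,
    show PySem.List.pyGet? medquadLabels ((8 : Nat) : Int) = some "symptoms" from rfl,
    show PySem.List.pyGet? medquadLabels ((9 : Nat) : Int) = some "causes" from rfl,
    show PySem.List.pyGet? medquadLabels ((10 : Nat) : Int) = some "treatment" from rfl,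
    show PySem.List.pyGet? medquadLabels ((11 : Nat) : Int) = some "exams and tests" from rfl,
    show PySem.List.pyGet? medquadLabels ((12 : Nat) : Int) = some "prevention" from rfl,
    show PySem.List.pyGet? medquadLabels ((13 : Nat) : Int) = some "outlook" from rfl,
    show PySem.List.pyGet? medquadLabels ((14 : Nat) : Int) = some "when to contact a medical professional" from rfl,
    show PySem.List.pyGet? medquadLabels ((15 : Nat) : Int) = some "complications" from rfl,
    show PySem.List.pyGet? medquadLabels ((16 : Nat) : Int) = some "frequency" from rfl,
    show PySem.List.pyGet? medquadLabels ((17 : Nat) : Int) = some "usage" from rfl,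
    show PySem.List.pyGet? medquadLabels ((18 : Nat) : Int) = some "indication" from rfl,
    show PySem.List.pyGet? medquadLabels ((19 : Nat) : Int) = some "other information" from rfl,
    show PySem.List.pyGet? medquadLabels ((20 : Nat) : Int) = some "precautions" from rfl,
    show PySem.List.pyGet? medquadLabels ((21 : Nat) : Int) = some "susceptibility" from rfl,
    show PySem.List.pyGet? medquadLabels ((22 : Nat) : Int) = some "dietary" from rfl,
    show PySem.List.pyGet? medquadLabels ((23 : Nat) : Int) = some "research" from rfl,
    show PySem.List.pyGet? medquadLabels ((24 : Nat) : Int) = some "information" from rfl]
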